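-- pv_equiv track=rewrite | github.com/lessersunda/lexirumah | lexirumah/scripts/util.py | resolve_brackets
-- ===== SOURCE A (Python) =====
-- def resolve_brackets(string):
--     """Resolve a string into all description without brackets
--
--     For a `string` with matching parentheses, but without nested parentheses,
--     yield every combination of the contents of any parenthesis being present or
--     absent.
--
--     >>> list(resolve_brackets("no brackets"))
--     ["no brackets"]
--
--     >>> sorted(list(resolve_brackets("(no )bracket(s)")))
--     ["bracket", "brackets", "no bracket", "no brackets"]
--
--     """
--     if "(" in string:
--         opening = string.index("(")
--         closing = string.index(")")
--         for form in resolve_brackets(string[:opening] + string[closing+1:]):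
--             yield form
--         for form in resolve_brackets(string[:opening] + string[opening+1:closing] + string[closing+1:]):
--             yield form
--     else:
--         yield string
-- ===== SOURCE B (Python) =====
-- import itertools
--
--
-- def resolve_brackets(string):
--     # Parse once into fixed literals and optional chunks, then splice every
--     # present/absent combination back together with itertools.product.
--     literals = []
--     options = []
--     rest = string
--     while "(" in rest:
--         opening = rest.index("(")
--         closing = rest.index(")")
--         literals.append(rest[:opening])
--         options.append(rest[opening + 1:closing])
--         rest = rest[closing + 1:]
--     literals.append(rest)
--     for choice in itertools.product(*[("", option) for option in options]):
--         yield "".join(lit + chosen for lit, chosen in zip(literals, choice)) + literals[-1]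
-- ===== Notes on version B (the rewrite author's own statement) =====
-- stated objective: idiomatic
-- what changed: B replaces A's branching recursion (which re-slices and re-scans the whole string for every present/absent choice) with a single left-to-right parse into literal/optional chunks followed by an itertools.product expansion that splices each combination back together.
-- outside the precondition, e.g. on resolve_brackets('((a))'): A returns [')', '', 'a'], B returns [')', '(a)']; on resolve_brackets('('): A raises ValueError, B raises ValueError
import Mathlib
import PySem

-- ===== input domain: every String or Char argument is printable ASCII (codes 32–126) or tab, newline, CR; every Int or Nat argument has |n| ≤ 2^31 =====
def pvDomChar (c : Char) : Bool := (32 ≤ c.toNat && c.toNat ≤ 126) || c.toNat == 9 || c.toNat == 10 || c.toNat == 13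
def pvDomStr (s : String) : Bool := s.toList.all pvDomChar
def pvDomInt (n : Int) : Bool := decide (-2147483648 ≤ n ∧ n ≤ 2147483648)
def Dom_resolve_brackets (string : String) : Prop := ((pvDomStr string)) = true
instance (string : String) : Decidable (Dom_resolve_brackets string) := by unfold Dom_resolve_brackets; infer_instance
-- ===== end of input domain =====

-- B parses the string once into literal/optional chunks and splices every
-- present/absent combination back with an itertools.product-style expansion
-- (idiomatic, single parse instead of re-slicing in every recursive call).


-- ===== PORT A =====
-- A is recursive on strings that can GROW outside Pre_ (first ')' before first
-- '('), where Python hits RecursionError; fuel makes the same computation total.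
-- Inside Pre_ every recursive call shrinks the string, so fuel length+1 is never
-- exhausted there.  Slices s[:o], s[o+1:c], s[c+1:] have non-negative bounds, so
-- they are exactly List.take/drop.
def pvGoA : Nat → List Char → List (List Char)
  | 0, _ => []
  | fuel+1, s =>
    if s.contains '(' then
      match PySem.List.index? s '(', PySem.List.index? s ')' with
      | some o, some c =>
          pvGoA fuel (s.take o ++ s.drop (c+1)) ++
          pvGoA fuel (s.take o ++ ((s.drop (o+1)).take (c - (o+1))) ++ s.drop (c+1))
      | _, _ => []   -- string.index(")") raises ValueError (excluded by Pre_)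
    else [s]

def resolve_brackets (string : String) : List String :=
  (pvGoA (string.toList.length + 1) string.toList).map (fun l => String.mk l)

-- ===== PORT B =====
-- the while-loop of Source B: collect literals and bracket contents, rest shrinks.
def pvParseB (rest : List Char) : List (List Char) × List (List Char) :=
  match PySem.List.index? rest '(', h2 : PySem.List.index? rest ')' with
  | some o, some c =>
      ((rest.take o) :: (pvParseB (rest.drop (c+1))).1,
       ((rest.drop (o+1)).take (c - (o+1))) :: (pvParseB (rest.drop (c+1))).2)
  | some _, none => ([rest], [])   -- rest.index(")") raises ValueError (excluded by Pre_)
  | none, _ => ([rest], [])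
termination_by rest.length
decreasing_by
  have := PySem.List.getElem_of_index?_eq_some h2
  obtain ⟨hk, -, -⟩ := this
  simp only [List.length_drop]; omega

-- itertools.product(*[("", option) for option in options]), rightmost fastest
def pvChoices : List (List Char) → List (List (List Char))
  | [] => [[]]
  | o :: rest => ([([] : List Char), o]).flatMap (fun ch => (pvChoices rest).map (ch :: ·))

-- "".join(lit + chosen for lit, chosen in zip(literals, choice)) + literals[-1]
-- (literals is nonempty by construction, so literals[-1] is getLastD)
def pvJoinB (lits : List (List Char)) (choice : List (List Char)) : List Char :=
  ((lits.zip choice).map (fun p => p.1 ++ p.2)).flatten ++ lits.getLastD []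

def resolve_brackets_alt (string : String) : List String :=
  let pr := pvParseB string.toList
  (pvChoices pr.2).map (fun ch => String.mk (pvJoinB pr.1 ch))

-- ===== PRECONDITION & SPEC =====
-- the '(' / ')' characters of the string, in order
def pvParens (s : List Char) : List Char := s.filter (fun c => c == '(' || c == ')')

-- the paren characters must be matched non-nested pairs "()", optionally
-- followed by stray ')' after the last '('
def pvOkParens : List Char → Bool
  | [] => true
  | [c] => if c = ')' then true else false
  | c :: c2 :: r =>
      if c = '(' then (if c2 = ')' then pvOkParens r else false)
      else if c = ')' then (c2 :: r).all (· == ')')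
      else false

-- Pre_ excludes strings whose parentheses are not flat matched "()" pairs (with
-- stray ')' allowed only after the last '('): outside it A either raises
-- (ValueError on an unclosed '(', RecursionError when the first ')' precedes the
-- first '(') or, for nested parentheses, returns combinations that the
-- docstring's stated domain ("matching parentheses, but without nested
-- parentheses") leaves undefined and B resolves differently.
def Pre_resolve_brackets (string : String) : Prop :=
  pvOkParens (pvParens string.toList) = true
instance (string : String) : Decidable (Pre_resolve_brackets string) := by
  unfold Pre_resolve_brackets; infer_instance

def pvWitness_resolve_brackets : String := "(no )bracket(s)"

def Spec_resolve_brackets (string : String) (out : List String) : Prop := out = resolve_brackets_alt string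
instance (string : String) (out : List String) : Decidable (Spec_resolve_brackets string out) := by unfold Spec_resolve_brackets; infer_instance

-- ===== CLAIM (what is proved, stated in full; the proofs are below) =====
def Claim_equal_resolve_brackets : Prop := ∀ (string : String), Dom_resolve_brackets string → Pre_resolve_brackets string → Spec_resolve_brackets string (resolve_brackets string)

-- ===== LEMMAS AND PROOFS =====

-- pvParens distributes over append (List.filter_append, specialised)
theorem pvParens_append (a b : List Char) : pvParens (a ++ b) = pvParens a ++ pvParens b := by
  simp [pvParens]

theorem pvParens_nil_iff (q : List Char) : pvParens q = [] ↔ '(' ∉ q ∧ ')' ∉ q := by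
  simp [pvParens, List.filter_eq_nil_iff]
  constructor
  · intro h; exact ⟨fun hm => by simpa using h _ hm, fun hm => by simpa using h _ hm⟩
  · rintro ⟨h1, h2⟩ c hc
    constructor
    · rintro rfl; exact h1 hc
    · rintro rfl; exact h2 hc

theorem pvOk_struct (l : List Char) (hok : pvOkParens l = true) (hm : '(' ∈ l) :
    ∃ l', l = '(' :: ')' :: l' ∧ pvOkParens l' = true := by
  cases l with
  | nil => simp at hm
  | cons x rest =>
    cases rest with
    | nil =>
      have hx := (show '(' = x by simpa using hm).symm
      subst hx
      simp [pvOkParens] at hok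
    | cons y r =>
      by_cases hx : x = '('
      · subst hx
        by_cases hy : y = ')'
        · subst hy
          exact ⟨r, rfl, by simpa [pvOkParens] using hok⟩
        · simp [pvOkParens, hy] at hok
      · by_cases hx2 : x = ')'
        · subst hx2
          have h1 : '(' ∈ y :: r := by
            rcases List.mem_cons.mp hm with h | h
            · exact absurd h.symm (by decide)
            · exact h
          have hall : (y :: r).all (· == ')') = true := by
            simpa [pvOkParens] using hok
          have := List.all_eq_true.mp hall _ h1
          simp at this
        · simp [pvOkParens, hx, hx2] at hok

-- the structural decomposition Pre_ forces as soon as the string contains '('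
theorem pv_decomp (s : List Char) (hc : '(' ∈ s)
    (hok : pvOkParens (pvParens s) = true) :
    ∃ p m t, s = p ++ '(' :: (m ++ ')' :: t) ∧ pvParens p = [] ∧ pvParens m = [] ∧
      pvOkParens (pvParens t) = true := by
  obtain ⟨o, ho⟩ := Option.isSome_iff_exists.mp ((PySem.List.index?_isSome_iff s '(').mpr hc)
  obtain ⟨p, suf, rfl, rfl, hnp⟩ := (PySem.List.index?_eq_some_iff _ _ _).mp ho
  have hmem : '(' ∈ pvParens (p ++ '(' :: suf) := by simp [pvParens]
  obtain ⟨l', hl', hok'⟩ := pvOk_struct _ hok hmem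
  rw [pvParens_append] at hl'
  have hp : pvParens p = [] := by
    cases hpp : pvParens p with
    | nil => rfl
    | cons x xs =>
      exfalso
      rw [hpp] at hl'
      have hx : x = '(' := by simpa using congrArg (fun l => l.head?) hl'
      have hx2 : x ∈ pvParens p := by rw [hpp]; exact List.mem_cons_self
      have hx3 : x ∈ p := List.mem_of_mem_filter hx2
      rw [hx] at hx3; exact hnp hx3
  rw [hp, List.nil_append] at hl'
  have hsuf : pvParens suf = ')' :: l' := by
    have hcp : pvParens ('(' :: suf) = '(' :: pvParens suf := by simp [pvParens]
    rw [hcp] at hl'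
    exact (List.cons_eq_cons.mp hl').2
  have hcl : ')' ∈ suf := by
    have hmem2 : ')' ∈ pvParens suf := by rw [hsuf]; exact List.mem_cons_self
    exact List.mem_of_mem_filter hmem2
  obtain ⟨cix, hcix⟩ := Option.isSome_iff_exists.mp ((PySem.List.index?_isSome_iff suf ')').mpr hcl)
  obtain ⟨m, t, rfl, rfl, hnm⟩ := (PySem.List.index?_eq_some_iff _ _ _).mp hcix
  have hm : pvParens m = [] := by
    cases hmm : pvParens m with
    | nil => rfl
    | cons y ys =>
      exfalso
      rw [pvParens_append, hmm] at hsuf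
      have hy : y = ')' := by simpa using congrArg (fun l => l.head?) hsuf
      have hy2 : y ∈ pvParens m := by rw [hmm]; exact List.mem_cons_self
      have hy3 : y ∈ m := List.mem_of_mem_filter hy2
      rw [hy] at hy3; exact hnm hy3
  refine ⟨p, m, t, rfl, hp, hm, ?_⟩
  rw [pvParens_append, hm, List.nil_append] at hsuf
  have hct : pvParens (')' :: t) = ')' :: pvParens t := by simp [pvParens]
  rw [hct] at hsuf
  rw [show pvParens t = l' from (List.cons_eq_cons.mp hsuf).2]
  exact hok'

theorem pv_idx_open (p m t : List Char) (hp : pvParens p = []) :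
    PySem.List.index? (p ++ '(' :: (m ++ ')' :: t)) '(' = some p.length :=
  (PySem.List.index?_eq_some_iff _ _ _).mpr ⟨p, m ++ ')' :: t, rfl, rfl, ((pvParens_nil_iff p).mp hp).1⟩

theorem pv_idx_close (p m t : List Char) (hp : pvParens p = []) (hm : pvParens m = []) :
    PySem.List.index? (p ++ '(' :: (m ++ ')' :: t)) ')' = some (p.length + 1 + m.length) := by
  refine (PySem.List.index?_eq_some_iff _ _ _).mpr ⟨p ++ '(' :: m, t, by simp, by simp; omega, ?_⟩
  simp only [List.mem_append, List.mem_cons, not_or]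
  exact ⟨((pvParens_nil_iff p).mp hp).2, ⟨by decide, ((pvParens_nil_iff m).mp hm).2⟩⟩

theorem pv_take_p (p m t : List Char) :
    (p ++ '(' :: (m ++ ')' :: t)).take p.length = p := List.take_left

theorem pv_mid (p m t : List Char) :
    ((p ++ '(' :: (m ++ ')' :: t)).drop (p.length + 1)).take
      ((p.length + 1 + m.length) - (p.length + 1)) = m := by
  have h1 : (p ++ '(' :: (m ++ ')' :: t)).drop (p.length + 1) = m ++ ')' :: t := by
    have he : p ++ '(' :: (m ++ ')' :: t) = (p ++ ['(']) ++ (m ++ ')' :: t) := by simp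
    have hl : p.length + 1 = (p ++ ['(']).length := by simp
    rw [he, hl, List.drop_left]
  have h2 : (p.length + 1 + m.length) - (p.length + 1) = m.length := by omega
  rw [h1, h2, List.take_left]

theorem pv_drop_t (p m t : List Char) :
    (p ++ '(' :: (m ++ ')' :: t)).drop (p.length + 1 + m.length + 1) = t := by
  have he : p ++ '(' :: (m ++ ')' :: t) = (p ++ '(' :: m ++ [')']) ++ t := by simp
  have hl : p.length + 1 + m.length + 1 = (p ++ '(' :: m ++ [')']).length := by simp; omega
  rw [he, hl, List.drop_left]

theorem pvParseB_no_open (s : List Char) (h : '(' ∉ s) : pvParseB s = ([s], []) := by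
  rw [pvParseB.eq_def]
  rw [(PySem.List.index?_eq_none_iff s '(').mpr h]

theorem pvParseB_decomp (p m t : List Char) (hp : pvParens p = []) (hm : pvParens m = []) :
    pvParseB (p ++ '(' :: (m ++ ')' :: t)) =
      (p :: (pvParseB t).1, m :: (pvParseB t).2) := by
  rw [pvParseB.eq_def]
  rw [pv_idx_open p m t hp, pv_idx_close p m t hp hm]
  simp only [pv_take_p, pv_mid, pv_drop_t]

theorem pvParseB_fst_cons (t : List Char) : ∃ l0 ls, (pvParseB t).1 = l0 :: ls := by
  rw [pvParseB.eq_def]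
  split <;> exact ⟨_, _, rfl⟩

theorem pv_parse_len (t : List Char) : (pvParseB t).1.length = (pvParseB t).2.length + 1 := by
  fun_induction pvParseB t <;> simp_all

theorem pvParseB_prepend (q t : List Char) (hq : pvParens q = [])
    (hok : pvOkParens (pvParens t) = true) (l0 : List Char) (ls os : List (List Char))
    (ht : pvParseB t = (l0 :: ls, os)) :
    pvParseB (q ++ t) = ((q ++ l0) :: ls, os) := by
  by_cases hc : '(' ∈ t
  · obtain ⟨p, m, t', rfl, hp, hm, -⟩ := pv_decomp t hc hok
    have hqp : pvParens (q ++ p) = [] := by rw [pvParens_append, hq, hp]; rfl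
    have h1 : pvParseB ((q ++ p) ++ '(' :: (m ++ ')' :: t')) =
        ((q ++ p) :: (pvParseB t').1, m :: (pvParseB t').2) := pvParseB_decomp _ m t' hqp hm
    rw [pvParseB_decomp p m t' hp hm] at ht
    have h2 := congrArg Prod.fst ht
    have h3 := congrArg Prod.snd ht
    simp only at h2 h3
    obtain ⟨rfl, rfl⟩ := List.cons_eq_cons.mp h2
    rw [List.append_assoc] at h1
    rw [h1, h3]
  · have hqc : '(' ∉ q ++ t := by
      simp only [List.mem_append, not_or]
      exact ⟨((pvParens_nil_iff q).mp hq).1, hc⟩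
    rw [pvParseB_no_open _ hqc]
    rw [pvParseB_no_open t hc] at ht
    have h2 := congrArg Prod.fst ht
    have h3 := congrArg Prod.snd ht
    simp only at h2 h3
    obtain ⟨rfl, rfl⟩ := List.cons_eq_cons.mp h2
    rw [← h3]

theorem pvChoices_cons (o : List Char) (rest : List (List Char)) :
    pvChoices (o :: rest) =
      (pvChoices rest).map (List.cons []) ++ (pvChoices rest).map (o :: ·) := by
  simp [pvChoices]

theorem pv_len_of_mem_choices (opts : List (List Char)) (ch : List (List Char))
    (h : ch ∈ pvChoices opts) : ch.length = opts.length := by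
  induction opts generalizing ch with
  | nil => simp [pvChoices] at h; simp [h]
  | cons o rest ih =>
    rw [pvChoices_cons] at h
    rcases List.mem_append.mp h with h | h <;>
      · obtain ⟨c, hc, rfl⟩ := List.mem_map.mp h
        simp [ih c hc]

theorem pvJoinB_cons (p l0 : List Char) (ls : List (List Char)) (ch : List Char)
    (chs : List (List Char)) :
    pvJoinB (p :: l0 :: ls) (ch :: chs) = p ++ ch ++ pvJoinB (l0 :: ls) chs := by
  simp [pvJoinB]

theorem pvJoinB_prepend (q l0 : List Char) (ls chs : List (List Char))
    (h : chs.length = ls.length) :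
    pvJoinB ((q ++ l0) :: ls) chs = q ++ pvJoinB (l0 :: ls) chs := by
  cases chs with
  | nil =>
    have hnil : ls = [] := by simpa using h.symm
    subst hnil
    simp [pvJoinB]
  | cons c cs =>
    cases ls with
    | nil => simp at h
    | cons l1 ls' => simp [pvJoinB]

-- main invariant: A's recursion computes exactly B's product over B's parse
theorem pv_main (fuel : Nat) : ∀ s : List Char, s.length < fuel →
    pvOkParens (pvParens s) = true →
    pvGoA fuel s = (pvChoices (pvParseB s).2).map (pvJoinB (pvParseB s).1) := by
  induction fuel with
  | zero => intro s h; omega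
  | succ f ih =>
    intro s hlen hok
    by_cases hc : '(' ∈ s
    · obtain ⟨p, m, t, rfl, hp, hm, hokt⟩ := pv_decomp s hc hok
      obtain ⟨l0, ls, hfst⟩ := pvParseB_fst_cons t
      rcases hpt : pvParseB t with ⟨fst, os⟩
      rw [hpt] at hfst
      simp only at hfst
      subst hfst
      have ht : pvParseB t = (l0 :: ls, os) := hpt
      have hlenos : os.length = ls.length := by
        have hpl := pv_parse_len t
        rw [ht] at hpl; simp at hpl; omega
      have hs1 : pvParseB (p ++ t) = ((p ++ l0) :: ls, os) :=
        pvParseB_prepend p t hp hokt l0 ls os ht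
      have hpm : pvParens (p ++ m) = [] := by rw [pvParens_append, hp, hm]; rfl
      have hs2 : pvParseB ((p ++ m) ++ t) = (((p ++ m) ++ l0) :: ls, os) :=
        pvParseB_prepend (p ++ m) t hpm hokt l0 ls os ht
      have hok1 : pvOkParens (pvParens (p ++ t)) = true := by
        rw [pvParens_append, hp, List.nil_append]; exact hokt
      have hok2 : pvOkParens (pvParens ((p ++ m) ++ t)) = true := by
        rw [pvParens_append, hpm, List.nil_append]; exact hokt
      have hlen1 : (p ++ t).length < f := by simp at hlen ⊢; omega
      have hlen2 : ((p ++ m) ++ t).length < f := by simp at hlen ⊢; omega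
      have hgo : pvGoA (f + 1) (p ++ '(' :: (m ++ ')' :: t)) =
          pvGoA f (p ++ t) ++ pvGoA f ((p ++ m) ++ t) := by
        rw [pvGoA]
        rw [if_pos (by simp [hc] : ((p ++ '(' :: (m ++ ')' :: t)).contains '(') = true)]
        rw [pv_idx_open p m t hp, pv_idx_close p m t hp hm]
        dsimp only
        rw [pv_take_p, pv_mid, pv_drop_t]
      rw [hgo, ih _ hlen1 hok1, ih _ hlen2 hok2, hs1, hs2]
      rw [pvParseB_decomp p m t hp hm, ht]
      simp only
      rw [pvChoices_cons]
      rw [List.map_append, List.map_map, List.map_map]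
      congr 1
      · apply List.map_congr_left
        intro ch hch
        have hlch : ch.length = ls.length := by
          rw [pv_len_of_mem_choices os ch hch, hlenos]
        simp only [Function.comp]
        rw [pvJoinB_prepend p l0 ls ch hlch, pvJoinB_cons]
        simp
      · apply List.map_congr_left
        intro ch hch
        have hlch : ch.length = ls.length := by
          rw [pv_len_of_mem_choices os ch hch, hlenos]
        simp only [Function.comp]
        rw [pvJoinB_prepend (p ++ m) l0 ls ch hlch, pvJoinB_cons]
    · rw [pvGoA, if_neg (by simpa using hc), pvParseB_no_open s hc]
      simp [pvChoices, pvJoinB]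

-- ===== VERDICT (by name: the statement is the Claim_ definition above) =====
theorem resolve_brackets_spec : Claim_equal_resolve_brackets := by
  intro string _ hpre
  unfold Spec_resolve_brackets resolve_brackets resolve_brackets_alt
  rw [pv_main (string.toList.length + 1) string.toList (by omega) hpre]
  simp [List.map_map, Function.comp]
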